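-- pv_equiv track=rewrite | github.com/pbui/advent-of-code-2020 | day07/day07-A.py | contains_target
-- ===== SOURCE A (Python) =====
-- def contains_target(rules, source, target):
--     frontier = [source]
--     visited  = set()
--
--     while frontier:
--         color = frontier.pop()
--         if color in visited:
--             continue
--
--         if color == target:
--             return True
--
--         visited.add(color)
--
--         for neighbor, amount in rules[color].items():
--             frontier.append(neighbor)
--
--     return False
-- ===== SOURCE B (Python) =====
-- def contains_target(rules, source, target):
--     # Level-synchronous saturation: repeatedly add every neighbor of the
--     # current reachable set until it stops growing, then test membership.
--     reach = {source}
--     while True: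
--         frontier = {n for c in reach for n in rules.get(c, {})}
--         if frontier <= reach:
--             return target in reach
--         reach |= frontier
-- ===== Notes on version B (the rewrite author's own statement) =====
-- stated objective: alternative
-- what changed: Replaces the explicit-stack DFS with early exit and per-node visited set by a level-synchronous saturation: grow the whole reachable set round by round until it is closed, then test target membership.
-- outside the precondition, e.g. on contains_target({'a': {'t': 1}, 'b': {'x': 1}}, 'a', 't'): A returns True, B returns True; on contains_target({'a': {'b': 1, 't': 1}}, 'a', 't'): A returns True, B returns True
import Mathlib
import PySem

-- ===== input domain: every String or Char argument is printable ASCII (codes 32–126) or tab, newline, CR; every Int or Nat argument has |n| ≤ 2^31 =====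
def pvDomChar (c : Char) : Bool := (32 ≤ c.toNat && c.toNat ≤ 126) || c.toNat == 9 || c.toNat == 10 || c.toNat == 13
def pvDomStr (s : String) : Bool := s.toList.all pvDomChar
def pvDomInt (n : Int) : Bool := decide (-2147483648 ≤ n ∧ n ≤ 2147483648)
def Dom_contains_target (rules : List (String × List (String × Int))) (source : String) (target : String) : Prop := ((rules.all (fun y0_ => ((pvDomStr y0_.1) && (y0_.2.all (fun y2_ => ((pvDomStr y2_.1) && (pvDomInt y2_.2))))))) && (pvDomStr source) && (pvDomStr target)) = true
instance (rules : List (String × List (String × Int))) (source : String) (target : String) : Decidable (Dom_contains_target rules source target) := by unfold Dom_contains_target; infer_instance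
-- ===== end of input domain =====

-- A is an explicit-stack DFS with early exit over the bag graph; B re-implements it as a
-- level-synchronous saturation of the whole reachable set (objective: alternative algorithm).

-- ===== PORT A =====
-- fuel potential for A's while-loop: one unit per rule entry plus its neighbor count,
-- counting only keys not yet visited (pvW_add_lt below shows it shrinks at every expansion)
def pvW (rules : List (String × List (String × Int))) (visited : PySem.Set String) : Nat :=
  match rules with
  | [] => 0
  | p :: rs => (if PySem.Set.contains visited p.1 then 0 else p.2.length + 1) + pvW rs visited

-- the 'while frontier:' loop of A, fueled (the fuel is proven sufficient under Pre_ in ctLoopA_iff)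
def ctLoopA (rules : List (String × List (String × Int))) (target : String) :
    Nat → List String → PySem.Set String → Bool
  | 0, _, _ => false
  | fuel+1, frontier, visited =>
    match PySem.List.pop? frontier (-1) with     -- while frontier: color = frontier.pop()
    | none => false                              -- frontier empty: loop ends, return False
    | some (color, rest) =>
      if PySem.Set.contains visited color then ctLoopA rules target fuel rest visited
      else if color == target then true
      else
        match (PySem.Dict.mk rules).get? color with
        | none => false                          -- Python raises KeyError on rules[color]; excluded by Pre_
        | some l => ctLoopA rules target fuel (rest ++ l.map Prod.fst) (PySem.Set.add visited color)

def contains_target (rules : List (String × List (String × Int))) (source : String) (target : String) : Bool :=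
  ctLoopA rules target (pvW rules PySem.Set.empty + 2) [source] PySem.Set.empty

-- ===== PORT B =====
-- frontier = {n for c in reach for n in rules.get(c, {})}
def ctFrontier (rules : List (String × List (String × Int))) (reach : PySem.Set String) : PySem.Set String :=
  PySem.Set.ofList (reach.flatMap (fun c => (((PySem.Dict.mk rules).get? c).getD []).map Prod.fst))

-- B's 'while True:' loop; the fuel is an upper bound on the number of rounds (each non-final
-- round adds at least one string of the finite universe to reach), proven sufficient in ctSat_iff
def ctSat (rules : List (String × List (String × Int))) (target : String) :
    Nat → PySem.Set String → Bool
  | 0, _ => false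
  | fuel+1, reach =>
    let frontier := ctFrontier rules reach
    if PySem.Set.issubset frontier reach then PySem.Set.contains reach target
    else ctSat rules target fuel (PySem.Set.union reach frontier)

def contains_target_alt (rules : List (String × List (String × Int))) (source : String) (target : String) : Bool :=
  ctSat rules target ((source :: rules.flatMap (fun p => p.1 :: p.2.map Prod.fst)).length + 1)
    (PySem.Set.ofList [source])

-- ===== PRECONDITION & SPEC =====
-- Pre_ is a closed-form sufficient condition that A never hits KeyError: the source is a key of
-- the table (or equals target), and every neighbor name in the table is a key or the target.
-- It excludes some inputs on which A still returns — tables with a dangling neighbor name that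
-- A's search happens never to pop (see the cites in the claim): a closed-form condition cannot
-- capture those without re-running the search; B returns the same value there anyway.
def Pre_contains_target (rules : List (String × List (String × Int))) (source : String) (target : String) : Prop :=
  source = target ∨
  (source ∈ rules.map Prod.fst ∧
    ∀ p ∈ rules, ∀ q ∈ p.2, q.1 = target ∨ q.1 ∈ rules.map Prod.fst)
instance (rules : List (String × List (String × Int))) (source : String) (target : String) : Decidable (Pre_contains_target rules source target) := by unfold Pre_contains_target; infer_instance

def pvWitness_contains_target : (List (String × List (String × Int))) × String × String :=
  ([("a", [("b", 1)]), ("b", [])], "a", "b")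

def Spec_contains_target (rules : List (String × List (String × Int))) (source : String) (target : String) (out : Bool) : Prop := out = contains_target_alt rules source target
instance (rules : List (String × List (String × Int))) (source : String) (target : String) (out : Bool) : Decidable (Spec_contains_target rules source target out) := by unfold Spec_contains_target; infer_instance

-- ===== CLAIM (what is proved, stated in full; the proofs are below) =====
def Claim_equal_contains_target : Prop := ∀ (rules : List (String × List (String × Int))) (source : String) (target : String), Dom_contains_target rules source target → Pre_contains_target rules source target → Spec_contains_target rules source target (contains_target rules source target)

-- ===== LEMMAS AND PROOFS =====

-- the adjacency both programs read off the rule table: first-match lookup, keys of the inner dict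
def pvAdj (rules : List (String × List (String × Int))) (c : String) : List String :=
  (((PySem.Dict.mk rules).get? c).getD []).map Prod.fst

def pvEdge (rules : List (String × List (String × Int))) (a b : String) : Prop :=
  b ∈ pvAdj rules a

def pvReach (rules : List (String × List (String × Int))) (a b : String) : Prop :=
  Relation.ReflTransGen (pvEdge rules) a b

lemma pvGet_mem (rules : List (String × List (String × Int))) (c : String) (l : List (String × Int))
    (h : (PySem.Dict.mk rules).get? c = some l) : (c, l) ∈ rules := by
  induction rules with
  | nil => simp [PySem.Dict.get?] at h
  | cons p rs ih =>
    rw [show p = (p.1, p.2) from rfl, PySem.Dict.get?_mk_cons] at h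
    by_cases hk : p.1 = c
    · simp [hk] at h; subst hk; simp [← h]
    · simp [hk] at h; exact List.mem_cons_of_mem _ (ih h)
lemma pvGet_isSome (rules : List (String × List (String × Int))) (c : String)
    (h : c ∈ rules.map Prod.fst) : ∃ l, (PySem.Dict.mk rules).get? c = some l := by
  induction rules with
  | nil => simp at h
  | cons p rs ih =>
    rw [show p = (p.1, p.2) from rfl]
    rw [PySem.Dict.get?_mk_cons]
    by_cases hk : p.1 = c
    · simp [hk]
    · simp only [List.map_cons, List.mem_cons] at h
      rcases h with h | h
      · exact absurd h.symm hk
      · simp only [hk, beq_iff_eq, if_false]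
        exact ih h
lemma containsAddMono {s : PySem.Set String} {x c : String} (h : PySem.Set.contains s x = true) :
    PySem.Set.contains (PySem.Set.add s c) x = true := by
  rw [PySem.Set.contains_iff] at h ⊢
  exact (PySem.Set.mem_add _ _ _).mpr (Or.inl h)

lemma pvW_head_mono (visited : PySem.Set String) (c k : String) (m : Nat) :
    (if PySem.Set.contains (PySem.Set.add visited c) k then 0 else m) ≤
      (if PySem.Set.contains visited k then 0 else m) := by
  cases hv : PySem.Set.contains visited k with
  | true => rw [containsAddMono hv]
  | false => split <;> simp

lemma pvW_add_le (rules : List (String × List (String × Int))) (visited : PySem.Set String) (c : String) :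
    pvW rules (PySem.Set.add visited c) ≤ pvW rules visited := by
  induction rules with
  | nil => simp [pvW]
  | cons p rs ih =>
    simp only [pvW]
    have hd := pvW_head_mono visited c p.1 (p.2.length + 1)
    omega

lemma pvW_add_lt {rules : List (String × List (String × Int))} {visited : PySem.Set String}
    {c : String} {l : List (String × Int)}
    (hc : PySem.Set.contains visited c = false) (hl : (PySem.Dict.mk rules).get? c = some l) :
    pvW rules (PySem.Set.add visited c) + l.length + 1 ≤ pvW rules visited := by
  induction rules with
  | nil => simp [PySem.Dict.get?] at hl
  | cons p rs ih =>
    rw [show p = (p.1, p.2) from rfl, PySem.Dict.get?_mk_cons] at hl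
    simp only [pvW]
    by_cases hk : p.1 = c
    · simp only [hk, beq_self_eq_true, if_true, Option.some.injEq] at hl
      have h2 : PySem.Set.contains (PySem.Set.add visited c) c = true := by
        rw [PySem.Set.contains_iff]; exact (PySem.Set.mem_add _ _ _).mpr (Or.inr rfl)
      have hle := pvW_add_le rs visited c
      subst hk
      rw [hc, h2, hl]
      simp only [if_true, Bool.false_eq_true, if_false]
      omega
    · simp only [hk, beq_iff_eq, if_false] at hl
      have := ih hl
      have hd := pvW_head_mono visited c p.1 (p.2.length + 1)
      omega
lemma mem_ctFrontier {rules : List (String × List (String × Int))} {reach : PySem.Set String}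
    {n : String} : n ∈ ctFrontier rules reach ↔ ∃ c ∈ reach, n ∈ pvAdj rules c := by
  simp [ctFrontier, pvAdj, PySem.Set.mem_ofList, List.mem_flatMap]

lemma nodup_length_le {l u : List String} (hn : l.Nodup) (hs : ∀ x ∈ l, x ∈ u) :
    l.length ≤ u.length := by
  calc l.length = l.toFinset.card := (List.toFinset_card_of_nodup hn).symm
    _ ≤ u.toFinset.card := Finset.card_le_card (fun x hx => by
        simp only [List.mem_toFinset] at hx ⊢; exact hs x hx)
    _ ≤ u.length := u.toFinset_card_le
lemma contains_false_of_not_mem {s : PySem.Set String} {x : String} (h : x ∉ s) :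
    PySem.Set.contains s x = false := by
  cases hc : PySem.Set.contains s x
  · rfl
  · exact absurd ((PySem.Set.contains_iff _ _).mp hc) h

lemma ctLoopA_iff (rules : List (String × List (String × Int))) (source target : String)
    (hG : ∀ p ∈ rules, ∀ q ∈ p.2, q.1 = target ∨ q.1 ∈ rules.map Prod.fst) :
    ∀ (fuel : Nat) (frontier : List String) (visited : PySem.Set String),
      frontier.length + pvW rules visited < fuel →
      (∀ c ∈ frontier, c = target ∨ c ∈ rules.map Prod.fst) →
      (∀ c ∈ frontier, pvReach rules source c) →
      PySem.Set.contains visited target = false →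
      (∀ c, PySem.Set.contains visited c = true → ∀ n ∈ pvAdj rules c,
        PySem.Set.contains visited n = true ∨ n ∈ frontier) →
      (source ∈ frontier ∨ PySem.Set.contains visited source = true) →
      (ctLoopA rules target fuel frontier visited = true ↔ pvReach rules source target) := by
  intro fuel
  induction fuel with
  | zero => intro frontier visited hfuel _ _ _ _ _; omega
  | succ fuel ih =>
    intro frontier visited hfuel hF hFR hVT hclosed hsrc
    rcases List.eq_nil_or_concat frontier with hnil | ⟨rest, color, hcat⟩
    · subst hnil
      have hmem : ∀ b, pvReach rules source b → PySem.Set.contains visited b = true := by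
        intro b hb
        induction hb with
        | refl =>
          rcases hsrc with h | h
          · simp at h
          · exact h
        | tail hab e ihb =>
          rcases hclosed _ ihb _ e with h | h
          · exact h
          · simp at h
      have hA : ctLoopA rules target (fuel+1) [] visited = false := rfl
      rw [hA]
      constructor
      · intro h; simp at h
      · intro hR; rw [hmem target hR] at hVT; simp at hVT
    · subst hcat
      simp only [List.concat_eq_append] at hfuel hF hFR hclosed hsrc ⊢
      have hpop : PySem.List.pop? (rest ++ [color]) (-1) = some (color, rest) :=
        PySem.List.pop?_last rest color
      have hcolorF : color ∈ rest ++ [color] := by simp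
      simp only [ctLoopA]
      rw [hpop]
      show (if PySem.Set.contains visited color then ctLoopA rules target fuel rest visited
        else if color == target then true
        else match (PySem.Dict.mk rules).get? color with
          | none => false
          | some l => ctLoopA rules target fuel (rest ++ l.map Prod.fst) (PySem.Set.add visited color)) = true
        ↔ pvReach rules source target
      by_cases hv : PySem.Set.contains visited color = true
      · rw [if_pos hv]
        refine ih rest visited (by simp only [List.length_append, List.length_cons, List.length_nil] at hfuel; omega)
          (fun c hc => hF c (List.mem_append_left _ hc))
          (fun c hc => hFR c (List.mem_append_left _ hc)) hVT ?_ ?_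
        · intro c hc n hn
          rcases hclosed c hc n hn with h | h
          · exact Or.inl h
          · rcases List.mem_append.mp h with h | h
            · exact Or.inr h
            · simp at h; subst h; exact Or.inl hv
        · rcases hsrc with h | h
          · rcases List.mem_append.mp h with h | h
            · exact Or.inl h
            · simp at h; subst h; exact Or.inr hv
          · exact Or.inr h
      · rw [if_neg hv]
        have hv' : PySem.Set.contains visited color = false := by simpa using hv
        by_cases ht : color = target
        · rw [if_pos (beq_iff_eq.mpr ht)]
          subst ht
          simp only [true_iff]
          exact hFR color hcolorF
        · rw [if_neg (fun h => ht (beq_iff_eq.mp h))]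
          obtain ⟨l, hl⟩ := pvGet_isSome rules color
            (by rcases hF color hcolorF with h | h
                exacts [absurd h ht, h])
          rw [hl]
          have hcl : (color, l) ∈ rules := pvGet_mem rules color l hl

          have hadjc : pvAdj rules color = l.map Prod.fst := by simp [pvAdj, hl]
          refine ih (rest ++ l.map Prod.fst) (PySem.Set.add visited color) ?_ ?_ ?_ ?_ ?_ ?_
          · have := pvW_add_lt hv' hl
            simp at hfuel ⊢
            omega
          · intro c hc
            rcases List.mem_append.mp hc with h | h
            · exact hF c (List.mem_append_left _ h)
            · obtain ⟨q, hq, hqc⟩ := List.mem_map.mp h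
              subst hqc
              exact hG _ hcl q hq
          · intro c hc
            rcases List.mem_append.mp hc with h | h
            · exact hFR c (List.mem_append_left _ h)
            · exact Relation.ReflTransGen.tail (hFR color hcolorF) (by rw [pvEdge, hadjc]; exact h)
          · refine contains_false_of_not_mem (fun hmem => ?_)
            rcases (PySem.Set.mem_add _ _ _).mp hmem with h | h
            · rw [(PySem.Set.contains_iff _ _).mpr h] at hVT; simp at hVT
            · exact ht h.symm
          · intro c hc n hn
            rcases (PySem.Set.mem_add _ _ _).mp ((PySem.Set.contains_iff _ _).mp hc) with h | h
            · rcases hclosed c ((PySem.Set.contains_iff _ _).mpr h) n hn with h2 | h2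
              · exact Or.inl (containsAddMono h2)
              · rcases List.mem_append.mp h2 with h2 | h2
                · exact Or.inr (List.mem_append_left _ h2)
                · simp at h2; subst h2
                  exact Or.inl ((PySem.Set.contains_iff _ _).mpr ((PySem.Set.mem_add _ _ _).mpr (Or.inr rfl)))
            · subst h
              rw [hadjc] at hn
              exact Or.inr (List.mem_append_right _ hn)
          · rcases hsrc with h | h
            · rcases List.mem_append.mp h with h | h
              · exact Or.inl (List.mem_append_left _ h)
              · simp at h; subst h
                exact Or.inr ((PySem.Set.contains_iff _ _).mpr ((PySem.Set.mem_add _ _ _).mpr (Or.inr rfl)))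
            · exact Or.inr (containsAddMono h)
lemma pvAdj_sub_U {rules : List (String × List (String × Int))} {source c n : String}
    (h : n ∈ pvAdj rules c) : n ∈ source :: rules.flatMap (fun p => p.1 :: p.2.map Prod.fst) := by
  unfold pvAdj at h
  cases hl : (PySem.Dict.mk rules).get? c with
  | none => rw [hl] at h; simp at h
  | some l =>
    rw [hl] at h
    simp only [Option.getD_some] at h
    have hcl : (c, l) ∈ rules := pvGet_mem rules c l hl
    apply List.mem_cons_of_mem
    rw [List.mem_flatMap]
    exact ⟨(c, l), hcl, List.mem_cons_of_mem _ h⟩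

lemma ctSat_iff (rules : List (String × List (String × Int))) (source target : String) :
    ∀ (fuel : Nat) (reach : PySem.Set String),
      reach.Nodup →
      (∀ c ∈ reach, c ∈ source :: rules.flatMap (fun p => p.1 :: p.2.map Prod.fst)) →
      source ∈ reach →
      (∀ c ∈ reach, pvReach rules source c) →
      (source :: rules.flatMap (fun p => p.1 :: p.2.map Prod.fst)).length + 2 ≤ fuel + reach.length →
      (ctSat rules target fuel reach = true ↔ pvReach rules source target) := by
  intro fuel
  induction fuel with
  | zero =>
    intro reach hn hU _ _ hfuel
    exact absurd (nodup_length_le hn hU) (by omega)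
  | succ fuel ih =>
    intro reach hn hU hsrcm hsound hfuel
    simp only [ctSat]
    by_cases hsub : PySem.Set.issubset (ctFrontier rules reach) reach = true
    · rw [if_pos hsub]
      constructor
      · intro h
        exact hsound target ((PySem.Set.contains_iff _ _).mp h)
      · intro hR
        have hcl : ∀ b, pvReach rules source b → b ∈ reach := by
          intro b hb
          induction hb with
          | refl => exact hsrcm
          | tail hab e ihb =>
            exact (PySem.Set.issubset_iff _ _).mp hsub _ (mem_ctFrontier.mpr ⟨_, ihb, e⟩)
        exact (PySem.Set.contains_iff _ _).mpr (hcl target hR)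
    · rw [if_neg hsub]
      have hex : ∃ n ∈ ctFrontier rules reach, n ∉ reach := by
        by_contra hcon
        push Not at hcon
        exact hsub ((PySem.Set.issubset_iff _ _).mpr hcon)
      obtain ⟨n, hnF, hnR⟩ := hex
      refine ih (PySem.Set.union reach (ctFrontier rules reach)) ?_ ?_ ?_ ?_ ?_
      · exact PySem.Set.nodup_union _ _ hn
      · intro c hc
        rcases (PySem.Set.mem_union _ _ _).mp hc with h | h
        · exact hU c h
        · obtain ⟨c', _, hadj⟩ := mem_ctFrontier.mp h
          exact pvAdj_sub_U hadj
      · exact (PySem.Set.mem_union _ _ _).mpr (Or.inl hsrcm)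
      · intro c hc
        rcases (PySem.Set.mem_union _ _ _).mp hc with h | h
        · exact hsound c h
        · obtain ⟨c', hc', hadj⟩ := mem_ctFrontier.mp h
          exact Relation.ReflTransGen.tail (hsound c' hc') hadj
      · have hsubm : ∀ x ∈ reach ++ [n], x ∈ PySem.Set.union reach (ctFrontier rules reach) := by
          intro x hx
          rcases List.mem_append.mp hx with h | h
          · exact (PySem.Set.mem_union _ _ _).mpr (Or.inl h)
          · simp at h; subst h
            exact (PySem.Set.mem_union _ _ _).mpr (Or.inr hnF)
        have hnd : (reach ++ [n]).Nodup := by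
          rw [List.nodup_append]
          refine ⟨hn, List.nodup_singleton n, fun a ha b hb hab => ?_⟩
          simp only [List.mem_singleton] at hb
          exact hnR (hb ▸ hab ▸ ha)
        have := nodup_length_le hnd hsubm
        simp at this
        omega
-- when source == target, A returns True at the very first pop, before touching the table
lemma contains_target_of_eq (rules : List (String × List (String × Int))) (source : String) :
    contains_target rules source source = true := by
  unfold contains_target
  rw [show pvW rules PySem.Set.empty + 2 = (pvW rules PySem.Set.empty + 1) + 1 from rfl]
  simp only [ctLoopA]
  have hpop : PySem.List.pop? [source] (-1) = some (source, []) := by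
    simpa using PySem.List.pop?_last [] source
  rw [hpop]
  simp

lemma contains_target_iff (rules : List (String × List (String × Int))) (source target : String)
    (hs : source ∈ rules.map Prod.fst)
    (hG : ∀ p ∈ rules, ∀ q ∈ p.2, q.1 = target ∨ q.1 ∈ rules.map Prod.fst) :
    contains_target rules source target = true ↔ pvReach rules source target := by
  refine ctLoopA_iff rules source target hG _ [source] PySem.Set.empty
    (by simp; omega) ?_ ?_ rfl ?_ (Or.inl (by simp))
  · intro c hc
    simp at hc; subst hc
    exact Or.inr hs
  · intro c hc
    simp at hc; subst hc
    exact Relation.ReflTransGen.refl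
  · intro c hc
    rw [show PySem.Set.contains PySem.Set.empty c = false from rfl] at hc
    simp at hc

lemma contains_target_alt_iff (rules : List (String × List (String × Int))) (source target : String) :
    contains_target_alt rules source target = true ↔ pvReach rules source target := by
  have hof : PySem.Set.ofList [source] = [source] :=
    PySem.Set.ofList_eq_self_of_nodup _ (List.nodup_singleton source)
  unfold contains_target_alt
  rw [hof]
  refine ctSat_iff rules source target _ [source] (List.nodup_singleton source) ?_
    (by simp) ?_ (by simp)
  · intro c hc
    simp at hc; subst hc
    exact List.mem_cons_self
  · intro c hc
    simp at hc; subst hc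
    exact Relation.ReflTransGen.refl

-- ===== VERDICT (by name: the statement is the Claim_ definition above) =====
theorem contains_target_spec : Claim_equal_contains_target := by
  intro rules source target _ hpre
  unfold Spec_contains_target
  rcases hpre with heq | ⟨hs, hG⟩
  · subst heq
    rw [contains_target_of_eq rules source,
      (contains_target_alt_iff rules source source).mpr Relation.ReflTransGen.refl]
  · rw [Bool.eq_iff_iff]
    exact (contains_target_iff rules source target hs hG).trans
      (contains_target_alt_iff rules source target).symm
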